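-- pv_equiv track=rewrite | github.com/Gaeunyee/zandi | 백준/Gold/15997. 승부 예측/승부 예측.py | f
-- ===== SOURCE A (Python) =====
-- def f(rank):
--     tmp = 0
--     ret = []
--     while tmp <= 3:
--         c = [rank[tmp][1]]
--         if tmp == 3:
--             ret.append(c)
--             break
--         while rank[tmp][0] == rank[tmp + 1][0]:
--             c.append(rank[tmp+1][1])
--             tmp += 1
--             if tmp == 3:
--                 ret.append(c)
--                 return ret
--         ret.append(c)
--         tmp += 1
--     return ret
-- ===== SOURCE B (Python) =====
-- def f(rank):
--     items = [rank[i] for i in range(4)]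
--
--     def groups(xs):
--         if not xs:
--             return []
--         k = xs[0][0]
--         j = 1
--         while j < len(xs) and xs[j][0] == k:
--             j += 1
--         return [[r[1] for r in xs[:j]]] + groups(xs[j:])
--
--     return groups(items)
-- ===== Notes on version B (the rewrite author's own statement) =====
-- stated objective: simpler
-- what changed: B first materializes the four rows, then groups consecutive equal-key runs with a recursive span (takeWhile/dropWhile) helper instead of A's nested while-loops with manual index bookkeeping, break and mid-loop return.
import Mathlib
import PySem

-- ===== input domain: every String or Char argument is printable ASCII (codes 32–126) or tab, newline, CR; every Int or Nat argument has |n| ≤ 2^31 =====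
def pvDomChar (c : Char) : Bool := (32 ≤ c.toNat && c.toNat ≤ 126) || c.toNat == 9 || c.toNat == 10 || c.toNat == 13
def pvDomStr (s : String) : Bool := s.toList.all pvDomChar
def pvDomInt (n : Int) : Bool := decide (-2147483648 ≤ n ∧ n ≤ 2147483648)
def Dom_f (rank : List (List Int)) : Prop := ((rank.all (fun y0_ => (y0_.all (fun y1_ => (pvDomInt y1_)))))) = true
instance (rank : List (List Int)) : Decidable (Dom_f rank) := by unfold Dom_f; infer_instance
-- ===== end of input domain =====

-- B groups consecutive equal-keyed rows with a recursive span instead of A's nested while-loops.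
-- ===== PORT A =====
-- rank[i] / rank[i][j]; under Pre_f always in range; out-of-range default 0 / [] is never hit inside Pre_f
def fRow (rank : List (List Int)) (i : Nat) : List Int :=
  PySem.List.pyGetD rank (i : Int) []
def fKey (rank : List (List Int)) (i : Nat) : Int :=
  PySem.List.pyGetD (fRow rank i) 0 0
def fVal (rank : List (List Int)) (i : Nat) : Int :=
  PySem.List.pyGetD (fRow rank i) 1 0

-- inner 'while rank[tmp][0] == rank[tmp+1][0]' loop; returns (c, tmp, early-return flag)
def fInner (rank : List (List Int)) : Nat → Nat → List Int → List Int × Nat × Bool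
  | 0, tmp, c => (c, tmp, false)   -- fuel exhausted: unreachable, tmp increases and is ≤ 3
  | fuel + 1, tmp, c =>
    if fKey rank tmp = fKey rank (tmp + 1) then
      let c := c ++ [fVal rank (tmp + 1)]
      let tmp := tmp + 1
      if tmp = 3 then (c, tmp, true) else fInner rank fuel tmp c
    else (c, tmp, false)

-- outer 'while tmp <= 3' loop
def fOuter (rank : List (List Int)) : Nat → Nat → List (List Int) → List (List Int)
  | 0, _, ret => ret   -- fuel exhausted: unreachable, at most 4 outer iterations
  | fuel + 1, tmp, ret =>
    if tmp ≤ 3 then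
      let c := [fVal rank tmp]
      if tmp = 3 then ret ++ [c]
      else
        match fInner rank 4 tmp c with
        | (c, _, true) => ret ++ [c]
        | (c, tmp', false) => fOuter rank fuel (tmp' + 1) (ret ++ [c])
    else ret

def f (rank : List (List Int)) : List (List Int) := fOuter rank 4 0 []

-- ===== PORT B =====
-- recursive 'groups': peel one consecutive run of equal-keyed rows (xs[:j] / xs[j:] = span), recurse on the rest
def gb (xs : List (List Int)) : List (List Int) :=
  match xs with
  | [] => []
  | x :: rest =>
    let k := PySem.List.pyGetD x 0 0
    let run := rest.takeWhile (fun r => PySem.List.pyGetD r 0 0 == k)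
    let tail := rest.dropWhile (fun r => PySem.List.pyGetD r 0 0 == k)
    ((x :: run).map (fun r => PySem.List.pyGetD r 1 0)) :: gb tail
termination_by xs.length
decreasing_by
  simp only [List.length_cons]
  exact Nat.lt_succ_of_le (rest.length_dropWhile_le _)

def f_alt (rank : List (List Int)) : List (List Int) :=
  gb [fRow rank 0, fRow rank 1, fRow rank 2, fRow rank 3]

-- ===== PRECONDITION & SPEC =====
-- Pre_f: the Python A indexes rank[0..3] and each of those rows at [0] and [1];
-- shorter lists / rows raise IndexError in both A and B.
def Pre_f (rank : List (List Int)) : Prop :=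
  4 ≤ rank.length ∧ ∀ r ∈ rank.take 4, 2 ≤ r.length
instance (rank : List (List Int)) : Decidable (Pre_f rank) := by unfold Pre_f; infer_instance
def pvWitness_f : List (List Int) := [[1, 10], [1, 20], [2, 30], [3, 40]]

def Spec_f (rank : List (List Int)) (out : List (List Int)) : Prop := out = f_alt rank
instance (rank : List (List Int)) (out : List (List Int)) : Decidable (Spec_f rank out) := by unfold Spec_f; infer_instance

-- ===== CLAIM (what is proved, stated in full; the proofs are below) =====
def Claim_equal_f : Prop := ∀ (rank : List (List Int)), Dom_f rank → Pre_f rank → Spec_f rank (f rank)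

-- ===== LEMMAS AND PROOFS =====

theorem f_eq_falt (rank : List (List Int)) : f rank = f_alt rank := by
  by_cases h01 : PySem.List.pyGetD (fRow rank 0) 0 0 = PySem.List.pyGetD (fRow rank 1) 0 0 <;>
  by_cases h12 : PySem.List.pyGetD (fRow rank 1) 0 0 = PySem.List.pyGetD (fRow rank 2) 0 0 <;>
  by_cases h23 : PySem.List.pyGetD (fRow rank 2) 0 0 = PySem.List.pyGetD (fRow rank 3) 0 0 <;>
  simp_all [f, f_alt, fOuter, fInner, gb, fKey, fVal, Bool.beq_comm]

-- ===== VERDICT (by name: the statement is the Claim_ definition above) =====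
theorem f_spec : Claim_equal_f := by
  intro rank _ _
  exact f_eq_falt rank
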